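-- pv_equiv track=rewrite | github.com/tblackwe/aoc-2025 | solutions/day-06/solution.py | extract_number_at_position
-- ===== SOURCE A (Python) =====
-- from typing import List, Tuple, Optional
--
-- def extract_number_at_position(row: str, pos: int) -> Optional[int]:
--     """
--     Extract a number in the column indicated by the operator position.
--
--     The operator position marks the leftmost position of the widest number
--     in that column. Numbers can be right-aligned, so we need to scan right
--     from the operator position to find where numbers actually are in each row.
--
--     Strategy:
--     1. Starting from operator position, look right to find a digit
--     2. Extract the complete number once a digit is found
--     3. Don't look too far right (max ~5 positions) to avoid jumping to next column
--     """
--     # Handle position out of bounds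
--     if pos >= len(row):
--         return None
--
--     # Scan from operator position rightward to find a number in this column
--     # We scan right because numbers are right-aligned
--     max_scan = min(len(row), pos + 6)  # Don't scan too far (next column might start)
--
--     for scan_pos in range(pos, max_scan):
--         if scan_pos < len(row) and row[scan_pos].isdigit():
--             # Found a digit! Extract the full number
--             start = scan_pos
--             while start > 0 and row[start - 1].isdigit():
--                 start -= 1
--
--             end = scan_pos
--             while end + 1 < len(row) and row[end + 1].isdigit():
--                 end += 1
--
--             # Make sure this number starts at or after the operator position
--             # (it's in this column, not the previous one)
--             if start >= pos:
--                 number_str = row[start:end + 1]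
--                 return int(number_str)
--             # If the number starts before pos but extends into it, take it too
--             elif start < pos <= end:
--                 number_str = row[start:end + 1]
--                 return int(number_str)
--
--     return None
-- ===== SOURCE B (Python) =====
-- from typing import Optional
--
-- def extract_number_at_position(row: str, pos: int) -> Optional[int]:
--     """Build all maximal digit runs in one pass, then pick the first run
--     visible in the 6-wide window starting at pos."""
--     n = len(row)
--     if pos >= n:
--         return None
--     # one left-to-right pass: collect maximal digit runs as (start, end) spans
--     runs = []
--     start = None
--     for i, ch in enumerate(row):
--         if ch.isdigit():
--             if start is None:
--                 start = i
--         else: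
--             if start is not None:
--                 runs.append((start, i - 1))
--                 start = None
--     if start is not None:
--         runs.append((start, n - 1))
--     # pick the first run whose digits reach the scan window [pos, pos+6)
--     limit = min(n, pos + 6)
--     for s, e in runs:
--         if e >= pos and max(s, pos) < limit:
--             return int(row[s:e + 1])
--     return None
-- ===== Notes on version B (the rewrite author's own statement) =====
-- stated objective: alternative
-- what changed: A scans the 6-wide window for a digit and expands left/right around it with two while loops; B instead makes one left-to-right pass collecting all maximal digit runs as (start,end) spans and then selects the first span that reaches the window [pos, pos+6), returning int(row[start:end+1]).
-- outside the precondition, e.g. on extract_number_at_position('34', -1): A returns 4, B returns 34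
import Mathlib
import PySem

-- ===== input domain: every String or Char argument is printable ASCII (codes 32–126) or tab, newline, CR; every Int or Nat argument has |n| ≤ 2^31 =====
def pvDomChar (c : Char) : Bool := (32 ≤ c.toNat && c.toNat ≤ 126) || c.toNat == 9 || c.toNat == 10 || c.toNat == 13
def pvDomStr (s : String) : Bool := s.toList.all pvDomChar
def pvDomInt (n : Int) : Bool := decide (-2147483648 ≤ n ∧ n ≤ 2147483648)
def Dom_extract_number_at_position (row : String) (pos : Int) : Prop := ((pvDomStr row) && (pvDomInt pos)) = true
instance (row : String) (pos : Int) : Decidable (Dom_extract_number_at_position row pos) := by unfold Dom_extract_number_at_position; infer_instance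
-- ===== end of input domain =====

-- B replaces A's expand-around-a-found-digit window scan by one pass collecting all maximal
-- digit runs followed by selecting the first run reaching the window (alternative structure,
-- same cost). Pre_ restricts pos to the natural domain 0 <= pos: for pos < 0 A's Python
-- negative-index wraparound yields accidental values (e.g. a suffix of a number) or raises.


-- ===== PORT A =====
-- Python ch.isdigit(); exact on the ASCII domain, where str.isdigit is '0'..'9'.
def pvDigit (c : Char) : Bool := c.isDigit

-- while start > 0 and row[start - 1].isdigit(): start -= 1
def pvExpandLeft (cs : List Char) (start : Int) : Int :=
  if h : 0 < start ∧ ((PySem.List.pyGet? cs (start - 1)).elim false pvDigit) = true then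
    pvExpandLeft cs (start - 1)
  else start
termination_by start.toNat
decreasing_by omega

-- while end + 1 < len(row) and row[end + 1].isdigit(): end += 1
def pvExpandRight (cs : List Char) (e : Int) : Int :=
  if h : e + 1 < (cs.length : Int) ∧ ((PySem.List.pyGet? cs (e + 1)).elim false pvDigit) = true then
    pvExpandRight cs (e + 1)
  else e
termination_by ((cs.length : Int) - e).toNat
decreasing_by omega

-- for scan_pos in range(pos, max_scan): … (early return)
def pvScanA (cs : List Char) (pos : Int) : List Int → Option Int
  | [] => none
  | sp :: rest =>
    if sp < (cs.length : Int) ∧ ((PySem.List.pyGet? cs sp).elim false pvDigit) = true then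
      if pos ≤ pvExpandLeft cs sp then
        PySem.Int.ofStr? (String.ofList (PySem.List.slice cs (some (pvExpandLeft cs sp)) (some (pvExpandRight cs sp + 1))))
      else if pvExpandLeft cs sp < pos ∧ pos ≤ pvExpandRight cs sp then
        PySem.Int.ofStr? (String.ofList (PySem.List.slice cs (some (pvExpandLeft cs sp)) (some (pvExpandRight cs sp + 1))))
      else pvScanA cs pos rest
    else pvScanA cs pos rest

def extract_number_at_position (row : String) (pos : Int) : Option Int :=
  if (row.toList.length : Int) ≤ pos then none
  else pvScanA row.toList pos
    (PySem.List.pyRange pos (min (row.toList.length : Int) (pos + 6)) 1)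

-- ===== PORT B =====
-- one pass over the characters: collect maximal digit runs as (start, end) spans
def pvRunsAux : List Char → Nat → Option Nat → List (Nat × Nat)
  | [], _, none => []
  | [], i, some s => [(s, i - 1)]
  | c :: rest, i, none =>
      if pvDigit c then pvRunsAux rest (i + 1) (some i) else pvRunsAux rest (i + 1) none
  | c :: rest, i, some s =>
      if pvDigit c then pvRunsAux rest (i + 1) (some s)
      else (s, i - 1) :: pvRunsAux rest (i + 1) none

-- for (s, e) in runs: first span reaching the window returns int(row[s:e+1])
def pvSelect (cs : List Char) (pos limit : Int) : List (Nat × Nat) → Option Int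
  | [] => none
  | (s, e) :: rest =>
    if pos ≤ (e : Int) ∧ max (s : Int) pos < limit then
      PySem.Int.ofStr? (String.ofList (PySem.List.slice cs (some (s : Int)) (some ((e : Int) + 1))))
    else pvSelect cs pos limit rest

def extract_number_at_position_alt (row : String) (pos : Int) : Option Int :=
  if (row.toList.length : Int) ≤ pos then none
  else pvSelect row.toList pos (min (row.toList.length : Int) (pos + 6)) (pvRunsAux row.toList 0 none)

-- ===== PRECONDITION & SPEC =====
-- Pre_ excludes pos < 0 (outside the natural column-position domain): there A's Python
-- negative indexing wraps around, returning accidental values or raising IndexError/ValueError.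
def Pre_extract_number_at_position (row : String) (pos : Int) : Prop := 0 ≤ pos
instance (row : String) (pos : Int) : Decidable (Pre_extract_number_at_position row pos) := by unfold Pre_extract_number_at_position; infer_instance

def pvWitness_extract_number_at_position : String × Int := ("ab12 34", 1)

def Spec_extract_number_at_position (row : String) (pos : Int) (out : Option Int) : Prop := out = extract_number_at_position_alt row pos
instance (row : String) (pos : Int) (out : Option Int) : Decidable (Spec_extract_number_at_position row pos out) := by unfold Spec_extract_number_at_position; infer_instance

-- ===== CLAIM (what is proved, stated in full; the proofs are below) =====
def Claim_equal_extract_number_at_position : Prop := ∀ (row : String) (pos : Int), Dom_extract_number_at_position row pos → Pre_extract_number_at_position row pos → Spec_extract_number_at_position row pos (extract_number_at_position row pos)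

-- ===== LEMMAS AND PROOFS =====

-- digit test at an absolute (Nat) position; out of range reads ' ', which is not a digit
def pvDg (cs : List Char) (k : Nat) : Bool := pvDigit (cs.getD k ' ')

-- the value both programs return for the run [s, e]
def pvVal (cs : List Char) (s e : Int) : Option Int :=
  PySem.Int.ofStr? (String.ofList (PySem.List.slice cs (some s) (some (e + 1))))

-- first digit position in [a, limit), the common reference point of both proofs
def pvFd (cs : List Char) (limit : Int) (a : Nat) : Option Nat :=
  if _h : (a : Int) < limit then
    if pvDg cs a then some a else pvFd cs limit (a + 1)
  else none
termination_by (limit - a).toNat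
decreasing_by omega

lemma pvDg_elim (cs : List Char) (k : Nat) :
    ((PySem.List.pyGet? cs (k : Int)).elim false pvDigit) = pvDg cs k := by
  rcases lt_or_ge k cs.length with h | h
  · simp [PySem.List.pyGet?_natCast, List.getElem?_eq_getElem h, pvDg]
  · simp [PySem.List.pyGet?_natCast, List.getElem?_eq_none_iff.mpr h, pvDg, pvDigit]

lemma expandRight_ge (cs : List Char) (e : Int) : e ≤ pvExpandRight cs e := by
  suffices H : ∀ f : Nat, ∀ e : Int, ((cs.length : Int) - e).toNat ≤ f → e ≤ pvExpandRight cs e by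
    exact H (((cs.length : Int) - e).toNat) e le_rfl
  intro f
  induction f with
  | zero =>
    intro e hf
    rw [pvExpandRight]
    split
    · next h => omega
    · exact le_rfl
  | succ f ih =>
    intro e hf
    rw [pvExpandRight]
    split
    · next h => have := ih (e + 1) (by omega); omega
    · exact le_rfl

lemma expandLeft_eq (cs : List Char) (s : Nat) :
    ∀ sp : Nat, s ≤ sp → sp < cs.length →
    (∀ k, s ≤ k → k ≤ sp → pvDg cs k = true) →
    (s = 0 ∨ pvDg cs (s - 1) = false) →
    pvExpandLeft cs (sp : Int) = (s : Int) := by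
  intro sp
  induction sp with
  | zero =>
    intro h1 _ _ _
    have hs0 : s = 0 := by omega
    rw [pvExpandLeft]
    simp [hs0]
  | succ m ih =>
    intro h1 h2 hall hs
    rw [pvExpandLeft]
    have hcast : ((m + 1 : Nat) : Int) - 1 = (m : Nat) := by push_cast; ring
    rw [hcast]
    by_cases hsm : s = m + 1
    · have hdg : pvDg cs m = false := by
        rcases hs with h0 | hb
        · omega
        · simpa [hsm] using hb
      rw [dif_neg (by rw [pvDg_elim, hdg]; simp)]
      exact_mod_cast congrArg Nat.cast hsm.symm
    · have hsm' : s ≤ m := by omega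
      have hdg : pvDg cs m = true := hall m hsm' (by omega)
      rw [dif_pos ⟨by positivity, by rw [pvDg_elim]; exact hdg⟩]
      exact ih hsm' (by omega) (fun k hk1 hk2 => hall k hk1 (by omega)) hs

lemma expandRight_eq (cs : List Char) (e : Nat) (h2 : e < cs.length)
    (he : e + 1 = cs.length ∨ pvDg cs (e + 1) = false) :
    ∀ d sp : Nat, sp ≤ e → e - sp = d →
    (∀ k, sp ≤ k → k ≤ e → pvDg cs k = true) →
    pvExpandRight cs (sp : Int) = (e : Int) := by
  intro d
  induction d with
  | zero =>
    intro sp h1 hd _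
    have hse : sp = e := by omega
    subst hse
    rw [pvExpandRight]
    rw [dif_neg]
    intro ⟨hlt, hdg⟩
    have hcast : ((sp : Nat) : Int) + 1 = ((sp + 1 : Nat) : Int) := by push_cast; ring
    rw [hcast, pvDg_elim] at hdg
    rcases he with h0 | hb
    · omega
    · rw [hb] at hdg; exact absurd hdg (by simp)
  | succ d ih =>
    intro sp h1 hd hall
    have hsp : sp < e := by omega
    rw [pvExpandRight]
    have hcast : ((sp : Nat) : Int) + 1 = ((sp + 1 : Nat) : Int) := by push_cast; ring
    rw [dif_pos ⟨by omega, by rw [hcast, pvDg_elim]; exact hall (sp + 1) (by omega) (by omega)⟩]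
    rw [hcast]
    exact ih (sp + 1) (by omega) (by omega) (fun k hk1 hk2 => hall k (by omega) hk2)

lemma fd_some (cs : List Char) (limit : Int) :
    ∀ f : Nat, ∀ a sp : Nat, (limit - (a : Int)).toNat ≤ f → pvFd cs limit a = some sp →
      a ≤ sp ∧ (sp : Int) < limit ∧ pvDg cs sp = true ∧
      ∀ t : Nat, a ≤ t → t < sp → pvDg cs t = false := by
  intro f
  induction f with
  | zero =>
    intro a sp hf h
    rw [pvFd] at h
    rw [dif_neg (by omega)] at h
    exact absurd h (by simp)
  | succ f ih =>
    intro a sp hf h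
    rw [pvFd] at h
    by_cases hab : (a : Int) < limit
    · rw [dif_pos hab] at h
      by_cases hdg : pvDg cs a = true
      · rw [if_pos hdg] at h
        obtain rfl : a = sp := by injection h
        exact ⟨le_rfl, hab, hdg, fun t ht1 ht2 => by omega⟩
      · rw [if_neg hdg] at h
        obtain ⟨k1, k2, k3, k4⟩ := ih (a + 1) sp (by omega) h
        refine ⟨by omega, k2, k3, fun t ht1 ht2 => ?_⟩
        rcases eq_or_lt_of_le ht1 with rfl | hlt
        · simpa using hdg
        · exact k4 t (by omega) ht2
    · rw [dif_neg hab] at h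
      exact absurd h (by simp)

lemma fd_none (cs : List Char) (limit : Int) :
    ∀ f : Nat, ∀ a : Nat, (limit - (a : Int)).toNat ≤ f → pvFd cs limit a = none →
      ∀ t : Nat, a ≤ t → (t : Int) < limit → pvDg cs t = false := by
  intro f
  induction f with
  | zero =>
    intro a hf h t ht1 ht2
    omega
  | succ f ih =>
    intro a hf h t ht1 ht2
    rw [pvFd] at h
    by_cases hab : (a : Int) < limit
    · rw [dif_pos hab] at h
      by_cases hdg : pvDg cs a = true
      · rw [if_pos hdg] at h; exact absurd h (by simp)
      · rw [if_neg hdg] at h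
        rcases eq_or_lt_of_le ht1 with rfl | hlt
        · simpa using hdg
        · exact ih (a + 1) (by omega) h t (by omega) ht2
    · omega

-- A's window scan computes: the run around the first digit in the window
lemma scanA_eq (cs : List Char) (pos limit : Int) (hlim : limit ≤ (cs.length : Int)) :
    ∀ f : Nat, ∀ a : Nat, (limit - (a : Int)).toNat ≤ f → pos ≤ (a : Int) →
    pvScanA cs pos (PySem.List.pyRange (a : Int) limit 1) =
      match pvFd cs limit a with
      | none => none
      | some sp => pvVal cs (pvExpandLeft cs (sp : Int)) (pvExpandRight cs (sp : Int)) := by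
  intro f
  induction f with
  | zero =>
    intro a hf ha
    rw [PySem.List.pyRange_one_eq_nil (by omega), pvFd, dif_neg (by omega)]
    rfl
  | succ f ih =>
    intro a hf ha
    rw [pvFd]
    by_cases hab : (a : Int) < limit
    · rw [PySem.List.pyRange_one_cons hab, dif_pos hab]
      show (if (a : Int) < (cs.length : Int) ∧ _ = true then _ else _) = _
      by_cases hdg : pvDg cs a = true
      · rw [if_pos ⟨by omega, by rw [pvDg_elim]; exact hdg⟩, if_pos hdg]
        have hge : (a : Int) ≤ pvExpandRight cs (a : Int) := expandRight_ge cs (a : Int)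
        by_cases h1 : pos ≤ pvExpandLeft cs (a : Int)
        · rw [if_pos h1]; rfl
        · rw [if_neg h1, if_pos ⟨by omega, by omega⟩]; rfl
      · rw [if_neg (fun hc => hdg (by rw [← pvDg_elim]; exact hc.2)), if_neg hdg]
        have hcast : (a : Int) + 1 = ((a + 1 : Nat) : Int) := by push_cast; ring
        rw [hcast]
        exact ih (a + 1) (by omega) (by omega)
    · rw [PySem.List.pyRange_one_eq_nil (by omega), dif_neg hab]
      rfl

-- invariant carried by B's single pass
def pvStInv (cs : List Char) (i : Nat) (cur : Option Nat) : Prop :=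
  match cur with
  | none => i = 0 ∨ pvDg cs (i - 1) = false
  | some s => s < i ∧ (∀ k, s ≤ k → k < i → pvDg cs k = true) ∧ (s = 0 ∨ pvDg cs (s - 1) = false)

-- what it means for (s, e) to be a maximal digit run of cs
def pvRunOK (cs : List Char) (r : Nat × Nat) : Prop :=
  r.1 ≤ r.2 ∧ r.2 < cs.length ∧ (∀ k, r.1 ≤ k → k ≤ r.2 → pvDg cs k = true) ∧
  (r.1 = 0 ∨ pvDg cs (r.1 - 1) = false) ∧ (r.2 + 1 = cs.length ∨ pvDg cs (r.2 + 1) = false)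

def pvLB (cur : Option Nat) (i : Nat) : Nat := match cur with | none => i | some s => s

lemma runs_main (cs : List Char) : ∀ (l : List Char) (i : Nat) (cur : Option Nat),
    cs.drop i = l → i ≤ cs.length → pvStInv cs i cur →
    (∀ r ∈ pvRunsAux l i cur, pvRunOK cs r ∧ pvLB cur i ≤ r.1) ∧
    (∀ j : Nat, j < cs.length → pvDg cs j = true → pvLB cur i ≤ j →
       ∃ r ∈ pvRunsAux l i cur, r.1 ≤ j ∧ j ≤ r.2) ∧
    (pvRunsAux l i cur).Pairwise (fun r r' => r.2 < r'.1) := by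
  intro l
  induction l with
  | nil =>
    intro i cur hl hi hinv
    have hlen : cs.length ≤ i := by
      have := congrArg List.length hl
      simp at this
      omega
    match cur with
    | none =>
      refine ⟨by simp [pvRunsAux], fun j hj _ hlb => by simp [pvLB] at hlb; omega, by simp [pvRunsAux]⟩
    | some s =>
      obtain ⟨hsi, hall, hsb⟩ := hinv
      have hieq : i = cs.length := by omega
      refine ⟨?_, ?_, by simp [pvRunsAux]⟩
      · intro r hr
        simp [pvRunsAux] at hr
        subst hr
        exact ⟨⟨by omega, by omega, fun k hk1 hk2 => hall k hk1 (by omega), hsb, Or.inl (by omega)⟩,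
          le_rfl⟩
      · intro j hj hdg hlb
        exact ⟨(s, i - 1), by simp [pvRunsAux], by simp [pvLB] at hlb; omega, by omega⟩
  | cons c rest ih =>
    intro i cur hl hi hinv
    have hi' : i < cs.length := by
      by_contra hc
      rw [List.drop_eq_nil_of_le (by omega)] at hl
      exact absurd hl.symm (by simp)
    rw [List.drop_eq_getElem_cons hi'] at hl
    have hc : c = cs[i] := by injection hl with h1 _; exact h1.symm
    have hrest : cs.drop (i + 1) = rest := by injection hl
    have hdgi : pvDigit c = pvDg cs i := by
      rw [hc, pvDg, List.getD_eq_getElem cs ' ' hi']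
    match cur with
    | none =>
      have hinv' : i = 0 ∨ pvDg cs (i - 1) = false := hinv
      show _ ∧ _ ∧ (pvRunsAux (c :: rest) i none).Pairwise _
      by_cases hd : pvDigit c = true
      · have hstep : pvRunsAux (c :: rest) i none = pvRunsAux rest (i + 1) (some i) := by
          simp [pvRunsAux, hd]
        obtain ⟨s1, s2, s3⟩ := ih (i + 1) (some i) hrest (by omega)
          ⟨by omega, fun k hk1 hk2 => by have hki : k = i := by omega
                                         subst hki; rw [← hdgi]; exact hd,
           hinv'⟩
        rw [hstep]
        refine ⟨fun r hr => ⟨(s1 r hr).1, ?_⟩, fun j hj hdg hlb => ?_, s3⟩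
        · have := (s1 r hr).2
          simp [pvLB] at this ⊢
          omega
        · simp [pvLB] at hlb
          exact s2 j hj hdg (by simp [pvLB]; omega)
      · have hstep : pvRunsAux (c :: rest) i none = pvRunsAux rest (i + 1) none := by
          simp [pvRunsAux, hd]
        have hdF : pvDg cs i = false := by rw [← hdgi]; simpa using hd
        obtain ⟨s1, s2, s3⟩ := ih (i + 1) none hrest (by omega) (Or.inr hdF)
        rw [hstep]
        refine ⟨fun r hr => ⟨(s1 r hr).1, ?_⟩, fun j hj hdg hlb => ?_, s3⟩
        · have := (s1 r hr).2
          simp [pvLB] at this ⊢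
          omega
        · simp [pvLB] at hlb
          have hji : j ≠ i := by
            intro hji
            subst hji
            rw [← hdgi] at hdg
            exact hd hdg
          exact s2 j hj hdg (by simp [pvLB]; omega)
    | some s =>
      obtain ⟨hsi, hall, hsb⟩ := hinv
      by_cases hd : pvDigit c = true
      · have hstep : pvRunsAux (c :: rest) i (some s) = pvRunsAux rest (i + 1) (some s) := by
          simp [pvRunsAux, hd]
        obtain ⟨s1, s2, s3⟩ := ih (i + 1) (some s) hrest (by omega)
          ⟨by omega, fun k hk1 hk2 => by
              rcases eq_or_lt_of_le (Nat.lt_succ_iff.mp hk2) with rfl | hlt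
              · rw [← hdgi]; exact hd
              · exact hall k hk1 hlt, hsb⟩
        rw [hstep]
        exact ⟨s1, s2, s3⟩
      · have hstep : pvRunsAux (c :: rest) i (some s) =
            (s, i - 1) :: pvRunsAux rest (i + 1) none := by
          simp [pvRunsAux, hd]
        have hdgF : pvDg cs i = false := by rw [← hdgi]; simpa using hd
        obtain ⟨s1, s2, s3⟩ := ih (i + 1) none hrest (by omega) (Or.inr (by simpa using hdgF))
        rw [hstep]
        have hheadOK : pvRunOK cs (s, i - 1) :=
          ⟨by omega, by omega, fun k hk1 hk2 => hall k hk1 (by omega), hsb,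
           Or.inr (by have : i - 1 + 1 = i := by omega
                      rw [this]; exact hdgF)⟩
        refine ⟨?_, ?_, ?_⟩
        · intro r hr
          rcases List.mem_cons.mp hr with rfl | hr'
          · exact ⟨hheadOK, le_rfl⟩
          · refine ⟨(s1 r hr').1, ?_⟩
            have := (s1 r hr').2
            simp [pvLB] at this ⊢
            omega
        · intro j hj hdg hlb
          simp [pvLB] at hlb
          by_cases hji : j < i
          · exact ⟨(s, i - 1), List.mem_cons_self, hlb, by omega⟩
          · have hji' : i + 1 ≤ j := by
              rcases eq_or_lt_of_le (Nat.le_of_not_lt hji) with rfl | h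
              · rw [hdgF] at hdg; exact absurd hdg (by simp)
              · omega
            obtain ⟨r, hr, hr1, hr2⟩ := s2 j hj hdg (by simp [pvLB]; omega)
            exact ⟨r, List.mem_cons_of_mem _ hr, hr1, hr2⟩
        · refine List.Pairwise.cons ?_ s3
          intro r hr
          have := (s1 r hr).2
          simp [pvLB] at this
          omega

-- B's selection returns the run around the first digit in the window
lemma select_some (cs : List Char) (pos limit : Int) (sp : Nat)
    (hsp1 : pos ≤ (sp : Int)) (hsp2 : (sp : Int) < limit)
    (hmin : ∀ t : Nat, pos ≤ (t : Int) → t < sp → pvDg cs t = false) :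
    ∀ R : List (Nat × Nat), (∀ r ∈ R, pvRunOK cs r) →
    R.Pairwise (fun r r' => r.2 < r'.1) →
    (∃ r ∈ R, r.1 ≤ sp ∧ sp ≤ r.2) →
    pvSelect cs pos limit R = pvVal cs (pvExpandLeft cs (sp : Int)) (pvExpandRight cs (sp : Int)) := by
  intro R
  induction R with
  | nil => intro _ _ hmem; simp at hmem
  | cons hd tl ih =>
    obtain ⟨s, e⟩ := hd
    intro hok hpair hmem
    obtain ⟨hOK, hOKtl⟩ := List.forall_mem_cons.mp hok
    obtain ⟨hse, hen, hdig, hlb, hrb⟩ := hOK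
    simp only at hse hen hdig hlb hrb
    obtain ⟨r, hr, hr1, hr2⟩ := hmem
    show (if pos ≤ (e : Int) ∧ max (s : Int) pos < limit then _ else _) = _
    by_cases hq : pos ≤ (e : Int) ∧ max (s : Int) pos < limit
    · rw [if_pos hq]
      -- the first digit in the window lies in this very run
      obtain ⟨hqe, hql⟩ := hq
      set t : Int := max (s : Int) pos with ht
      have ht0 : 0 ≤ t := le_trans (by positivity) (le_max_left _ _)
      have hts : s ≤ t.toNat := by omega
      have hte : t.toNat ≤ e := by omega
      have htd : pvDg cs t.toNat = true := hdig t.toNat hts hte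
      have hsp_le : sp ≤ t.toNat := by
        by_contra hc
        have := hmin t.toNat (by omega) (by omega)
        rw [this] at htd
        exact absurd htd (by simp)
      have hspe : sp ≤ e := le_trans hsp_le hte
      have hrhd : r = (s, e) := by
        rcases List.mem_cons.mp hr with h | h
        · exact h
        · exfalso
          have := (List.pairwise_cons.mp hpair).1 r h
          simp only at this
          omega
      have hs_sp : s ≤ sp := by rw [hrhd] at hr1; exact hr1
      rw [expandLeft_eq cs s sp hs_sp (by omega)
            (fun k hk1 hk2 => hdig k hk1 (by omega)) hlb,
          expandRight_eq cs e (by omega) hrb (e - sp) sp hspe rfl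
            (fun k hk1 hk2 => hdig k (by omega) hk2)]
      rfl
    · rw [if_neg hq]
      have hrtl : r ∈ tl := by
        rcases List.mem_cons.mp hr with h | h
        · exfalso
          apply hq
          rw [h] at hr1 hr2
          simp only at hr1 hr2
          constructor
          · omega
          · apply lt_of_le_of_lt (b := (sp : Int)) _ hsp2
            omega
        · exact h
      exact ih hOKtl (List.pairwise_cons.mp hpair).2 ⟨r, hrtl, hr1, hr2⟩

lemma select_none (cs : List Char) (pos limit : Int)
    (hnod : ∀ t : Nat, pos ≤ (t : Int) → (t : Int) < limit → pvDg cs t = false) :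
    ∀ R : List (Nat × Nat), (∀ r ∈ R, pvRunOK cs r) →
    pvSelect cs pos limit R = none := by
  intro R
  induction R with
  | nil => intro _; rfl
  | cons hd tl ih =>
    obtain ⟨s, e⟩ := hd
    intro hok
    obtain ⟨hOK, hOKtl⟩ := List.forall_mem_cons.mp hok
    obtain ⟨hse, hen, hdig, _, _⟩ := hOK
    simp only at hse hen hdig
    show (if pos ≤ (e : Int) ∧ max (s : Int) pos < limit then _ else _) = _
    rw [if_neg, ]
    · exact ih hOKtl
    · rintro ⟨hqe, hql⟩
      set t : Int := max (s : Int) pos with ht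
      have ht0 : 0 ≤ t := le_trans (by positivity) (le_max_left _ _)
      have htd : pvDg cs t.toNat = true := hdig t.toNat (by omega) (by omega)
      have := hnod t.toNat (by omega) (by omega)
      rw [this] at htd
      exact absurd htd (by simp)

-- ===== VERDICT (by name: the statement is the Claim_ definition above) =====
theorem extract_number_at_position_spec : Claim_equal_extract_number_at_position := by
  intro row pos hdom hpre
  unfold Spec_extract_number_at_position
  unfold extract_number_at_position extract_number_at_position_alt
  set cs := row.toList with hcs
  by_cases hlen : (cs.length : Int) ≤ pos
  · rw [if_pos hlen, if_pos hlen]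
  · rw [if_neg hlen, if_neg hlen]
    have h0 : 0 ≤ pos := hpre
    have hp : ((pos.toNat : Nat) : Int) = pos := Int.toNat_of_nonneg h0
    rw [← hp]
    set limit : Int := min (cs.length : Int) ((pos.toNat : Int) + 6) with hlimit
    have hlim : limit ≤ (cs.length : Int) := min_le_left _ _
    rw [scanA_eq cs (pos.toNat : Int) limit hlim ((limit - (pos.toNat : Int)).toNat) pos.toNat
      le_rfl le_rfl]
    obtain ⟨hsound, hcomp, hpair⟩ := runs_main cs cs 0 none List.drop_zero (Nat.zero_le _)
      (Or.inl rfl)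
    cases hfd : pvFd cs limit pos.toNat with
    | none =>
      have hnod := fd_none cs limit ((limit - (pos.toNat : Int)).toNat) pos.toNat le_rfl hfd
      rw [select_none cs (pos.toNat : Int) limit
        (fun t ht1 ht2 => hnod t (by omega) ht2) (pvRunsAux cs 0 none)
        (fun r hr => (hsound r hr).1)]
    | some sp =>
      obtain ⟨k1, k2, k3, k4⟩ := fd_some cs limit ((limit - (pos.toNat : Int)).toNat)
        pos.toNat sp le_rfl hfd
      have hspn : sp < cs.length := by omega
      obtain ⟨r, hr, hr1, hr2⟩ := hcomp sp hspn k3 (by simp [pvLB])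
      rw [select_some cs (pos.toNat : Int) limit sp (by omega) k2
        (fun t ht1 ht2 => k4 t (by omega) ht2) (pvRunsAux cs 0 none)
        (fun r hr => (hsound r hr).1) hpair ⟨r, hr, hr1, hr2⟩]
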